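-- pv_equiv track=rewrite | github.com/whj1an/2024Fall | A_ITI 1120A/Assignment 3/A3/a3_part2_300411829.py | oPify
-- ===== SOURCE A (Python) =====
-- def oPify(s):
--     '''
--     (str) -> str
--     '''
--     #如果字符串长度为1,则直接返回
--     if len(s) < 2:
--         return s
--
--     result = "" #初始化空字符串
--
--     for i in range(len(s)-1): #根据题意,最后一个不需要判断
--         front = s[i]
--         second = s[i + 1]
--
--         result += front #先把第一个放进去
--
--         if front.isalpha() and second.isalpha(): # panduan panduan
--             if front.isupper(): # 插o/O
--                 result += 'O'
--             else:
--                 result += 'o'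
--
--             if second.isupper():
--                 result += 'P'
--             else:
--                 result += 'p'
--
--     result += s[-1] #将最后一个字符串加进去
--     return result
-- ===== SOURCE B (Python) =====
-- def oPify(s):
--     # Two-stage: split s into maximal alphabetic runs / single non-letters,
--     # expand each run by inserting the case-coded infixes between its letters,
--     # and concatenate the pieces.
--     out = []
--     i = 0
--     n = len(s)
--     while i < n:
--         if s[i].isalpha():
--             j = i + 1
--             while j < n and s[j].isalpha():
--                 j += 1
--             prev = s[i]
--             buf = [prev]
--             for c in s[i + 1:j]:
--                 buf.append('O' if prev.isupper() else 'o')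
--                 buf.append('P' if c.isupper() else 'p')
--                 buf.append(c)
--                 prev = c
--             out.append(''.join(buf))
--             i = j
--         else:
--             out.append(s[i])
--             i += 1
--     return ''.join(out)
-- ===== Notes on version B (the rewrite author's own statement) =====
-- stated objective: alternative
-- what changed: Instead of A's single index loop checking every adjacent pair, B segments the string into maximal alphabetic runs and single non-letters, expands each run separately by joining its letters with the case-coded infixes, and concatenates the pieces.
import Mathlib
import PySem

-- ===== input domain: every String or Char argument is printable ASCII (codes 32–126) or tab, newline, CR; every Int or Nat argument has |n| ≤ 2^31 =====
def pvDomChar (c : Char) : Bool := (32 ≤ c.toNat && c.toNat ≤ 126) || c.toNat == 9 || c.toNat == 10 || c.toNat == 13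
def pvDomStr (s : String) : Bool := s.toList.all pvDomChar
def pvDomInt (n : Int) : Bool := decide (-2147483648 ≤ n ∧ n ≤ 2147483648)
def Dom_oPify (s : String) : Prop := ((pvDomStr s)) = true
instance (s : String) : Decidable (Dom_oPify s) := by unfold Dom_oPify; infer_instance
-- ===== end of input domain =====

-- B replaces A's per-gap index loop by a run decomposition: maximal alphabetic runs are expanded separately and concatenated (alternative decomposition); same return value.

-- ===== PORT A =====
def oPify (s : String) : String :=
  let cs := s.toList
  if cs.length < 2 then s
  else
    let result :=
      (PySem.List.pyRange 0 ((cs.length : Int) - 1) 1).foldl (fun result i =>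
        let front := PySem.List.pyGetD cs i ' '
        let second := PySem.List.pyGetD cs (i + 1) ' '
        let result := result ++ [front]
        if PySem.Chars.isalpha front && PySem.Chars.isalpha second then
          (result ++ [if PySem.Chars.isupper front then 'O' else 'o'])
            ++ [if PySem.Chars.isupper second then 'P' else 'p']
        else result) []
    String.ofList (result ++ [PySem.List.pyGetD cs (-1) ' '])

-- ===== PORT B =====
-- inner for-loop of Source B: buf starts as [prev]; each letter c appends infix + c, prev := c
def pvExpandRun (prev : Char) : List Char → List Char
  | [] => [prev]
  | c :: rest =>
    prev :: (if PySem.Chars.isupper prev then 'O' else 'o')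
      :: (if PySem.Chars.isupper c then 'P' else 'p') :: pvExpandRun c rest

-- outer while-loop of Source B: take a maximal alphabetic run and expand it, or copy one non-letter
def pvGo : List Char → List Char
  | [] => []
  | c :: t =>
    if PySem.Chars.isalpha c then
      pvExpandRun c (t.takeWhile PySem.Chars.isalpha) ++ pvGo (t.dropWhile PySem.Chars.isalpha)
    else c :: pvGo t
termination_by cs => cs.length
decreasing_by
  · have := t.length_dropWhile_le PySem.Chars.isalpha
    simp; omega
  · simp

def oPify_alt (s : String) : String := String.ofList (pvGo s.toList)

-- ===== PRECONDITION & SPEC =====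
def Spec_oPify (s : String) (out : String) : Prop := out = oPify_alt s
instance (s : String) (out : String) : Decidable (Spec_oPify s out) := by unfold Spec_oPify; infer_instance

-- ===== CLAIM (what is proved, stated in full; the proofs are below) =====
def Claim_equal_oPify : Prop := ∀ (s : String), Dom_oPify s → Spec_oPify s (oPify s)

-- ===== LEMMAS AND PROOFS =====

-- the infix inserted between an adjacent pair
def pvInfix (a b : Char) : List Char :=
  if PySem.Chars.isalpha a && PySem.Chars.isalpha b then
    [if PySem.Chars.isupper a then 'O' else 'o', if PySem.Chars.isupper b then 'P' else 'p']
  else []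

-- what A contributes per adjacent pair
def pvSeg (ab : Char × Char) : List Char := [ab.1] ++ pvInfix ab.1 ab.2

-- the common reference form: recursion over adjacent pairs
def pvCanon : List Char → List Char
  | [] => []
  | [c] => [c]
  | a :: b :: t => a :: (pvInfix a b ++ pvCanon (b :: t))

-- zip(s, s[1:]) as an index comprehension
lemma pvZip_eq_range_map (cs : List Char) (d : Char) :
    cs.zip (cs.drop 1) =
      (List.range (cs.length - 1)).map (fun k => (cs.getD k d, cs.getD (k + 1) d)) := by
  apply List.ext_getElem
  · simp
  · intro i h1 h2
    have hlen : i + 1 < cs.length := by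
      simp at h1; omega
    simp [List.getElem_zip, List.getD_eq_getElem?_getD, hlen, Nat.lt_of_succ_lt hlen]

-- A's indexed per-step extension equals the pair segment at that index
lemma pvBody_eq (cs : List Char) (i : Int) (hi : i ∈ PySem.List.pyRange 0 ((cs.length : Int) - 1) 1) :
    ∀ (acc : List Char),
      (let front := PySem.List.pyGetD cs i ' '
       let second := PySem.List.pyGetD cs (i + 1) ' '
       let acc := acc ++ [front]
       if PySem.Chars.isalpha front && PySem.Chars.isalpha second then
         (acc ++ [if PySem.Chars.isupper front then 'O' else 'o'])
           ++ [if PySem.Chars.isupper second then 'P' else 'p']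
       else acc)
      = acc ++ pvSeg (cs.getD i.toNat ' ', cs.getD (i.toNat + 1) ' ') := by
  intro acc
  rw [PySem.List.mem_pyRange_one] at hi
  obtain ⟨h0, h1⟩ := hi
  have hi' : i = (i.toNat : Int) := by omega
  have e1 : PySem.List.pyGetD cs i ' ' = cs.getD i.toNat ' ' := by
    rw [hi', PySem.List.pyGetD_natCast]; simp [max_eq_left h0]
  have e2 : PySem.List.pyGetD cs (i + 1) ' ' = cs.getD (i.toNat + 1) ' ' := by
    rw [hi', show ((i.toNat : Int) + 1) = ((i.toNat + 1 : Nat) : Int) by push_cast; ring,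
      PySem.List.pyGetD_natCast]; simp [max_eq_left h0]
  simp only [e1, e2, pvSeg, pvInfix]
  split <;> simp

-- the pair-flatMap form of A equals the reference recursion
lemma pvFlat_eq_canon : ∀ (cs : List Char) (hne : cs ≠ []),
    (cs.zip (cs.drop 1)).flatMap pvSeg ++ [cs.getLast hne] = pvCanon cs := by
  intro cs
  induction cs with
  | nil => intro h; exact absurd rfl h
  | cons a t ih =>
    intro _
    cases t with
    | nil => simp [pvCanon]
    | cons b t' =>
      have := ih (by simp)
      simp only [List.drop_succ_cons, List.drop_zero, List.zip_cons_cons,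
        List.flatMap_cons, List.getLast_cons (by simp : b :: t' ≠ [])] at *
      rw [List.append_assoc, this]
      simp [pvCanon, pvSeg]

-- expanding a maximal alphabetic run matches the reference recursion over the run and beyond
lemma pvExpand_eq : ∀ (t rest : List Char) (a : Char),
    PySem.Chars.isalpha a = true → (∀ x ∈ t, PySem.Chars.isalpha x = true) →
    (∀ r rr, rest = r :: rr → PySem.Chars.isalpha r = false) →
    pvExpandRun a t ++ pvCanon rest = pvCanon (a :: (t ++ rest)) := by
  intro t
  induction t with
  | nil =>
    intro rest a ha _ hrest
    cases rest with
    | nil => simp [pvExpandRun, pvCanon]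
    | cons r rr =>
      have hr := hrest r rr rfl
      simp [pvExpandRun, pvCanon, pvInfix, hr]
  | cons b t' ih =>
    intro rest a ha hall hrest
    have hb : PySem.Chars.isalpha b = true := hall b (by simp)
    have hall' : ∀ x ∈ t', PySem.Chars.isalpha x = true := fun x hx => hall x (by simp [hx])
    have := ih rest b hb hall' hrest
    simp only [pvExpandRun, List.cons_append, this]
    simp [pvCanon, pvInfix, ha, hb]

-- B's run loop equals the reference recursion
lemma pvGo_eq_canon : ∀ (n : Nat) (cs : List Char), cs.length ≤ n → pvGo cs = pvCanon cs := by
  intro n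
  induction n with
  | zero =>
    intro cs h
    have : cs = [] := by cases cs <;> simp_all
    simp [this, pvGo, pvCanon]
  | succ n ih =>
    intro cs h
    cases cs with
    | nil => simp [pvGo, pvCanon]
    | cons c t =>
      by_cases hc : PySem.Chars.isalpha c = true
      · rw [pvGo, if_pos hc]
        have hlen : (t.dropWhile PySem.Chars.isalpha).length ≤ n := by
          have := t.length_dropWhile_le PySem.Chars.isalpha
          simp at h; omega
        rw [ih _ hlen,
          pvExpand_eq (t.takeWhile PySem.Chars.isalpha) (t.dropWhile PySem.Chars.isalpha) c hc
            (fun x hx => List.mem_takeWhile_imp hx)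
            (fun r rr hr => by
              have := List.head?_dropWhile_not PySem.Chars.isalpha t
              rw [hr] at this; simpa using this),
          List.takeWhile_append_dropWhile]
      · rw [pvGo, if_neg hc, ih t (by simp at h; omega)]
        cases t with
        | nil => simp [pvCanon]
        | cons b t' =>
          simp [pvCanon, pvInfix, Bool.eq_false_iff.mpr hc]

-- ===== VERDICT (by name: the statement is the Claim_ definition above) =====
theorem oPify_spec : Claim_equal_oPify := by
  intro s _
  unfold Spec_oPify oPify oPify_alt
  simp only []
  have hs : s = String.ofList s.toList := by simp
  by_cases h : s.toList.length < 2
  · rw [if_pos h]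
    rcases hcs : s.toList with _ | ⟨c, _ | ⟨c2, t⟩⟩
    · rw [hs, hcs]; simp [pvGo]
    · rw [hs, hcs]
      by_cases hc : PySem.Chars.isalpha c = true <;>
        simp [pvGo, pvExpandRun, hc]
    · exfalso; rw [hcs] at h; simp at h
  · rw [if_neg h]
    congr 1
    set cs := s.toList with hcs
    have hne : cs ≠ [] := by intro hn; rw [hn] at h; simp at h
    rw [PySem.List.foldl_congr_mem' _ _
        (fun acc (i : Int) => acc ++ pvSeg (cs.getD i.toNat ' ', cs.getD (i.toNat + 1) ' ')) _
        (fun i hi acc => pvBody_eq cs i hi acc)]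
    rw [PySem.List.foldl_append_eq_flatMap]
    have hn1 : ((cs.length : Int) - 1 - 0).toNat = cs.length - 1 := by omega
    rw [PySem.List.pyRange_one, hn1, PySem.List.pyGetD_neg_one cs ' ' hne,
      pvGo_eq_canon cs.length cs le_rfl, ← pvFlat_eq_canon cs hne, pvZip_eq_range_map cs ' ']
    simp only [List.flatMap_def, List.map_map, List.nil_append]
    have hmap : List.map ((fun i : Int => pvSeg (cs.getD i.toNat ' ', cs.getD (i.toNat + 1) ' ')) ∘
          fun k : Nat => 0 + (k : Int)) (List.range (cs.length - 1))
        = List.map (pvSeg ∘ fun k => (cs.getD k ' ', cs.getD (k + 1) ' '))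
            (List.range (cs.length - 1)) :=
      List.map_congr_left (fun k _ => by simp)
    rw [hmap]
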